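-- pv_equiv track=rewrite | github.com/juvelop17/problem_solving | python/PStest/201009_c/1.py | solution
-- ===== SOURCE A (Python) =====
-- def convert(n, base):
--     T = "0123456789"
--     q, r = divmod(n, base)
--     if q == 0:
--         return T[r]
--     else:
--         return convert(q, base) + T[r]
--
-- def solution(N):
--     max_sum = -1
--     max_k = -1
--     for i in range(2,10):
--         num = convert(N,i)
--         sum = 1
--         for n in num:
--             if n != '0':
--                 sum *= int(n)
--         if max_sum <= sum:
--             max_sum = sum
--             max_k = i
--
--     return [max_k, max_sum]
-- ===== SOURCE B (Python) =====
-- def solution(N):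
--     best_p = -1
--     best_k = -1
--     for i in range(2, 10):
--         p = 1
--         n = N
--         while n:
--             n, r = divmod(n, i)
--             if r:
--                 p *= r
--         if best_p <= p:
--             best_p = p
--             best_k = i
--     return [best_k, best_p]
-- ===== Notes on version B (the rewrite author's own statement) =====
-- stated objective: simpler
-- what changed: B replaces A's recursive base-conversion to a digit string plus a second pass multiplying its nonzero digit characters with a single iterative divmod loop that multiplies nonzero remainders directly, never building a string.
import Mathlib
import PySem

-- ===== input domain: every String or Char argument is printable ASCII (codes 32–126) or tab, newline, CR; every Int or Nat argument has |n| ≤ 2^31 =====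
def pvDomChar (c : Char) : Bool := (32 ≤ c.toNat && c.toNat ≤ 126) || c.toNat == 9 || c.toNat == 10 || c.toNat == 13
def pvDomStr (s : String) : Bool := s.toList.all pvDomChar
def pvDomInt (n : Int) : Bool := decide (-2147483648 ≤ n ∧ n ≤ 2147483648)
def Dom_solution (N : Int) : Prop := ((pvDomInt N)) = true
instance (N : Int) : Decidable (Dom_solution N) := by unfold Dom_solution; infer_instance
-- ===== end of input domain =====

-- B replaces A's recursive base-conversion to a digit string followed by a
-- second pass multiplying its nonzero digit characters with a single iterative
-- divmod loop that multiplies nonzero remainders directly (objective: simpler).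

-- ===== PORT A =====

-- division step facts used by the ports' termination proofs
lemma pvFloordiv_step (n b : Int) (hn : 0 < n) (hb : 2 ≤ b) :
    PySem.Int.floordiv n b < n ∧ 0 ≤ PySem.Int.floordiv n b := by
  constructor
  · rw [PySem.Int.floordiv_lt_iff_lt_mul (by omega)]
    nlinarith
  · rw [PySem.Int.le_floordiv_iff_mul_le (by omega)]
    omega

lemma pvFloordiv_zero (b : Int) (hb : 2 ≤ b) : PySem.Int.floordiv 0 b = 0 := by
  rw [PySem.Int.floordiv_eq_ediv_of_pos (by omega)]
  simp

-- T[r] for T = "0123456789"; exact for 0 ≤ r < 10 (the only indices A reaches: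
-- r = n % base with 2 ≤ base ≤ 9), where Python's T[r] returns this character.
def digitA (r : Int) : Char :=
  (PySem.List.pyGet? ['0','1','2','3','4','5','6','7','8','9'] r).getD '0'

-- int(c) for a one-character digit string; exact on the digit characters A feeds it.
def intOfChar (c : Char) : Int := (PySem.Int.ofChars? [c]).getD 0

-- convert(n, base), returning the string as its character list.  The dite guard
-- (2 ≤ base ∧ 0 ≤ n) only makes the recursion total: on every call A performs
-- (base ∈ 2..9, and for n < 0 the Python recursion never terminates — excluded
-- by Pre_solution) the guard holds and the body is Python's.
def convertA (n base : Int) : List Char :=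
  if h : 2 ≤ base ∧ 0 ≤ n then
    if hq : PySem.Int.floordiv n base = 0 then
      [digitA (PySem.Int.mod n base)]
    else
      convertA (PySem.Int.floordiv n base) base ++ [digitA (PySem.Int.mod n base)]
  else []
termination_by n.toNat
decreasing_by
  have hn : 0 < n := by
    rcases lt_or_eq_of_le h.2 with h' | h'
    · exact h'
    · exact absurd (by rw [← h']; exact pvFloordiv_zero base h.1) hq
  have := pvFloordiv_step n base hn h.1
  omega

def solution (N : Int) : List Int :=
  let st := (PySem.List.pyRange 2 10 1).foldl
    (fun (st : Int × Int) (i : Int) =>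
      let num := convertA N i
      let s := num.foldl (fun acc c => if c ≠ '0' then acc * intOfChar c else acc) 1
      if st.1 ≤ s then (s, i) else st)
    (-1, -1)
  [st.2, st.1]

-- ===== PORT B =====

-- the `while n:` loop of Source B: repeatedly divmod, multiplying nonzero remainders.
-- The (0 ≤ n ∧ 2 ≤ base) part of the guard only makes it total (on n < 0 the
-- Python loop never terminates — excluded by Pre_solution).
def prodLoop (n base p : Int) : Int :=
  if h : n ≠ 0 ∧ 0 ≤ n ∧ 2 ≤ base then
    prodLoop (PySem.Int.floordiv n base) base
      (if PySem.Int.mod n base ≠ 0 then p * PySem.Int.mod n base else p)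
  else p
termination_by n.toNat
decreasing_by
  have := pvFloordiv_step n base (by omega) h.2.2
  omega

def solution_alt (N : Int) : List Int :=
  let st := (PySem.List.pyRange 2 10 1).foldl
    (fun (st : Int × Int) (i : Int) =>
      let p := prodLoop N i 1
      if st.1 ≤ p then (p, i) else st)
    (-1, -1)
  [st.2, st.1]

-- ===== PRECONDITION & SPEC =====
-- A's recursive convert never reaches q = 0 for negative n (divmod floors, so q
-- stays negative), so A hits the recursion limit and raises RecursionError on
-- every N < 0; Pre_ excludes exactly those inputs.
def Pre_solution (N : Int) : Prop := 0 ≤ N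
instance (N : Int) : Decidable (Pre_solution N) := by unfold Pre_solution; infer_instance
def pvWitness_solution : Int := (17)

def Spec_solution (N : Int) (out : List Int) : Prop := out = solution_alt N
instance (N : Int) (out : List Int) : Decidable (Spec_solution N out) := by unfold Spec_solution; infer_instance

-- ===== CLAIM (what is proved, stated in full; the proofs are below) =====
def Claim_equal_solution : Prop := ∀ (N : Int), Dom_solution N → Pre_solution N → Spec_solution N (solution N)

-- ===== LEMMAS AND PROOFS =====

-- the accumulator scales out of prodLoop
lemma prodLoop_scale : ∀ (k : Nat) (n base : Int), n.toNat = k →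
    ∀ p, prodLoop n base p = p * prodLoop n base 1 := by
  intro k
  induction k using Nat.strong_induction_on with
  | _ k ih =>
    intro n base hk p
    by_cases h : n ≠ 0 ∧ 0 ≤ n ∧ 2 ≤ base
    · have hstep := pvFloordiv_step n base (by omega) h.2.2
      have hlt : (PySem.Int.floordiv n base).toNat < k := by omega
      conv_lhs => rw [prodLoop]
      conv_rhs => rw [prodLoop]
      rw [dif_pos h, dif_pos h,
          ih _ hlt _ base rfl (if PySem.Int.mod n base ≠ 0 then p * PySem.Int.mod n base else p),
          ih _ hlt _ base rfl (if PySem.Int.mod n base ≠ 0 then 1 * PySem.Int.mod n base else 1)]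
      by_cases hr : PySem.Int.mod n base = 0 <;> simp [hr] <;> ring
    · conv_lhs => rw [prodLoop]
      conv_rhs => rw [prodLoop]
      rw [dif_neg h, dif_neg h]
      ring

lemma digit_val {r : Int} (h0 : 0 ≤ r) (h10 : r < 10) :
    intOfChar (digitA r) = r ∧ (digitA r = '0' ↔ r = 0) := by
  interval_cases r <;> exact ⟨by decide, by decide⟩

-- product of A's nonzero digit characters = B's divmod loop
lemma convert_prod (base : Int) (hb2 : 2 ≤ base) (hb10 : base ≤ 10) :
    ∀ (k : Nat) (n : Int), n.toNat = k → 0 ≤ n → ∀ p,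
      (convertA n base).foldl (fun acc c => if c ≠ '0' then acc * intOfChar c else acc) p
        = prodLoop n base p := by
  intro k
  induction k using Nat.strong_induction_on with
  | _ k ih =>
    intro n hk hn p
    have hbpos : (0:Int) < base := by omega
    have hr0 := PySem.Int.mod_nonneg n hbpos
    have hrb := PySem.Int.mod_lt n hbpos
    obtain ⟨hval, hzero⟩ := digit_val hr0 (by omega)
    conv_lhs => rw [convertA]
    rw [dif_pos (⟨hb2, hn⟩ : 2 ≤ base ∧ 0 ≤ n)]
    by_cases hq : PySem.Int.floordiv n base = 0
    · rw [dif_pos hq]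
      simp only [List.foldl_cons, List.foldl_nil]
      by_cases hn0 : n = 0
      · have hr : PySem.Int.mod n base = 0 := by
          subst hn0
          rw [PySem.Int.mod_eq_emod_of_pos hbpos]; simp
        conv_rhs => rw [prodLoop]
        rw [dif_neg (by simp [hn0])]
        simp [hzero.mpr hr]
      · conv_rhs => rw [prodLoop]
        rw [dif_pos ⟨hn0, hn, hb2⟩]
        conv_rhs => rw [prodLoop]
        rw [dif_neg (by simp [hq])]
        by_cases hr : PySem.Int.mod n base = 0
        · simp [hr, show digitA 0 = '0' from by decide]
        · have hdz : ¬ digitA (PySem.Int.mod n base) = '0' := fun h => hr (hzero.mp h)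
          simp [hdz, hr, hval]
    · have hnn0 : n ≠ 0 := by
        intro h; exact hq (by rw [h]; exact pvFloordiv_zero base hb2)
      have hstep := pvFloordiv_step n base (by omega) hb2
      have hlt : (PySem.Int.floordiv n base).toNat < k := by omega
      rw [dif_neg hq]
      simp only [List.foldl_append, List.foldl_cons, List.foldl_nil]
      rw [ih _ hlt _ rfl hstep.2 p]
      conv_rhs => rw [prodLoop]
      rw [dif_pos ⟨hnn0, hn, hb2⟩,
          prodLoop_scale _ _ base rfl
            (if PySem.Int.mod n base ≠ 0 then p * PySem.Int.mod n base else p),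
          prodLoop_scale _ _ base rfl p]
      by_cases hr : PySem.Int.mod n base = 0
      · simp [hr, show digitA 0 = '0' from by decide]
      · have hdz : ¬ digitA (PySem.Int.mod n base) = '0' := fun h => hr (hzero.mp h)
        simp [hdz, hr, hval]
        ring

-- ===== VERDICT (by name: the statement is the Claim_ definition above) =====
theorem solution_spec : Claim_equal_solution := by
  intro N _ hPre
  unfold Spec_solution solution solution_alt
  have key : ∀ i : Int, 2 ≤ i → i ≤ 10 →
      (convertA N i).foldl (fun acc c => if c ≠ '0' then acc * intOfChar c else acc) 1
        = prodLoop N i 1 :=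
    fun i h1 h2 => convert_prod i h1 h2 N.toNat N rfl hPre 1
  have hlist : PySem.List.pyRange 2 10 1 = [2,3,4,5,6,7,8,9] := by decide
  rw [hlist]
  simp only [List.foldl]
  rw [key 2 (by norm_num) (by norm_num), key 3 (by norm_num) (by norm_num),
      key 4 (by norm_num) (by norm_num), key 5 (by norm_num) (by norm_num),
      key 6 (by norm_num) (by norm_num), key 7 (by norm_num) (by norm_num),
      key 8 (by norm_num) (by norm_num), key 9 (by norm_num) (by norm_num)]
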